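-- pv_equiv track=rewrite | github.com/jciura/SCG-code-comprehension | src/graph/context.py | extract_usage_fragment
-- ===== SOURCE A (Python) =====
-- from typing import List, Tuple, Dict, Any, Set, Optional
--
-- def extract_usage_fragment(code: str, target_method: str, context_lines: int = 5) -> Optional[str]:
--     """
--         Extracts a fragment of code showing usage of a target method.
--
--         Searches for occurrences of `target_method(` and returns nearby lines
--         for contextual understanding.
--
--         Args:
--             code (str): Source code text.
--             target_method (str): Method name to locate.
--             context_lines (int, optional): Number of lines before and after to include.
--                 Defaults to 5.
--
--         Returns:
--             Optional[str]: Code fragment containing the method call, or None if not found.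
--     """
--     if not target_method or f'{target_method}(' not in code:
--         return None
--     code_lines = code.split('\n')
--     for i, line in enumerate(code_lines):
--         if f'{target_method}(' in line:
--             start = max(0, i - context_lines)
--             end = min(len(code_lines), i + context_lines + 1)
--             return '\n'.join(code_lines[start:end])
--     return None
-- ===== SOURCE B (Python) =====
-- from typing import Optional
--
-- def extract_usage_fragment(code: str, target_method: str, context_lines: int = 5) -> Optional[str]:
--     pattern = f'{target_method}('
--     # a method name containing a newline can never occur inside a single line
--     if not target_method or '\n' in target_method or pattern not in code:
--         return None
--     pos = code.find(pattern)
--     i = code.count('\n', 0, pos)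
--     code_lines = code.split('\n')
--     lo = max(0, i - context_lines)
--     hi = min(len(code_lines), i + context_lines + 1)
--     return '\n'.join(code_lines[lo:hi])
-- ===== Notes on version B (the rewrite author's own statement) =====
-- stated objective: alternative
-- what changed: Replaced the per-line enumerate scan for the first line containing 'target_method(' by an offset computation: one code.find locates the first occurrence and code.count('\n', 0, pos) converts the character offset to the line index.
import Mathlib
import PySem

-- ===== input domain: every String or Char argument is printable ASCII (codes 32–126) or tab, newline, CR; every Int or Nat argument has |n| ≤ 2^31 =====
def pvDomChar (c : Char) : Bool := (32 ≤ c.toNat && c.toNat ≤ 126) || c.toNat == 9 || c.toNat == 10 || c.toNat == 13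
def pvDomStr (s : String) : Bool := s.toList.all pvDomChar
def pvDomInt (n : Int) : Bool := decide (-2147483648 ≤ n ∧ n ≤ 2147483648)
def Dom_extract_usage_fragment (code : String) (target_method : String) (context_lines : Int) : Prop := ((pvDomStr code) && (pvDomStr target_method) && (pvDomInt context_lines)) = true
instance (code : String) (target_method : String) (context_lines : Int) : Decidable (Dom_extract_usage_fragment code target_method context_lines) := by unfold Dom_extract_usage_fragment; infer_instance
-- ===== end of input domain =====

-- B replaces A's per-line scan for the first matching line by one find over the whole
-- string plus a newline count up to that offset (objective: alternative decomposition).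

-- ===== PORT A =====
-- the `for i, line in enumerate(code_lines): if pat in line: return '\n'.join(...)` loop
def pvALoop (pat : String) (code_lines : List String) (ctx : Int) : Nat → List String → Option String
  | _, [] => none
  | i, line :: rest =>
    if PySem.Str.isIn pat line then
      some (PySem.Str.join "\n" (PySem.List.slice code_lines
        (some (max 0 ((i : Int) - ctx))) (some (min ((code_lines.length : Int)) ((i : Int) + ctx + 1)))))
    else pvALoop pat code_lines ctx (i + 1) rest

def extract_usage_fragment (code : String) (target_method : String) (context_lines : Int) : Option String :=
  if target_method = "" || !(PySem.Str.isIn (target_method ++ "(") code) then none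
  else
    let code_lines := (PySem.Str.split? code "\n").getD []   -- sep "\n" ≠ "": split? is some
    pvALoop (target_method ++ "(") code_lines context_lines 0 code_lines

-- ===== PORT B =====
def extract_usage_fragment_alt (code : String) (target_method : String) (context_lines : Int) : Option String :=
  let pattern := target_method ++ "("
  if target_method = "" || PySem.Str.isIn "\n" target_method || !(PySem.Str.isIn pattern code) then none
  else
    let pos := PySem.Str.find code pattern
    -- code.count('\n', 0, pos) is the count of the slice code[0:pos] — exact, 0 ≤ pos here
    let i := PySem.Str.count (PySem.Str.slice code none (some pos)) "\n"
    let code_lines := (PySem.Str.split? code "\n").getD []   -- sep "\n" ≠ "": split? is some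
    let lo := max 0 ((i : Int) - context_lines)
    let hi := min ((code_lines.length : Int)) ((i : Int) + context_lines + 1)
    some (PySem.Str.join "\n" (PySem.List.slice code_lines (some lo) (some hi)))

-- ===== PRECONDITION & SPEC =====
def Spec_extract_usage_fragment (code : String) (target_method : String) (context_lines : Int) (out : Option String) : Prop := out = extract_usage_fragment_alt code target_method context_lines
instance (code : String) (target_method : String) (context_lines : Int) (out : Option String) : Decidable (Spec_extract_usage_fragment code target_method context_lines out) := by unfold Spec_extract_usage_fragment; infer_instance

-- ===== CLAIM (what is proved, stated in full; the proofs are below) =====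
def Claim_equal_extract_usage_fragment : Prop := ∀ (code : String) (target_method : String) (context_lines : Int), Dom_extract_usage_fragment code target_method context_lines → Spec_extract_usage_fragment code target_method context_lines (extract_usage_fragment code target_method context_lines)

-- ===== LEMMAS AND PROOFS =====

-- structural model of code.split('\n') on the char level
def pvPre (pre : List Char) : List (List Char) → List (List Char)
  | [] => [pre]
  | h :: t => (pre ++ h) :: t

def pvLines : List Char → List (List Char)
  | [] => [[]]
  | c :: rest => if c = '\n' then [] :: pvLines rest else pvPre [c] (pvLines rest)

theorem pvPre_pvPre (a b : List Char) (l : List (List Char)) :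
    pvPre a (pvPre b l) = pvPre (a ++ b) l := by
  cases l <;> simp [pvPre]

theorem pvLines_ne_nil (cs : List Char) : pvLines cs ≠ [] := by
  induction cs with
  | nil => simp [pvLines]
  | cons c rest ih =>
    by_cases h : c = '\n' <;> simp [pvLines, h]
    cases hl : pvLines rest <;> simp [pvPre]

theorem pvPre_nil (l : List (List Char)) (h : l ≠ []) : pvPre [] l = l := by
  cases l with
  | nil => exact absurd rfl h
  | cons a t => simp [pvPre]

theorem pvSplitOn_go_eq (fuel : Nat) (l cur : List Char) (acc : List (List Char))
    (h : l.length < fuel) :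
    PySem.Chars.splitOn.go ['\n'] fuel l cur acc = acc.reverse ++ pvPre cur.reverse (pvLines l) := by
  induction fuel generalizing l cur acc with
  | zero => omega
  | succ fuel ih =>
    cases l with
    | nil => simp [PySem.Chars.splitOn.go, pvLines, pvPre]
    | cons c rest =>
      by_cases hc : c = '\n'
      · subst hc
        have hpre : List.isPrefixOf ['\n'] ('\n' :: rest) = true := by
          simp [List.isPrefixOf]
        rw [PySem.Chars.splitOn.go]
        simp only [hpre, if_true, List.length_cons] at *
        rw [show (List.drop ([].length + 1) ('\n' :: rest)) = rest by simp]
        rw [ih rest [] (cur.reverse :: acc) (by simpa using Nat.lt_of_succ_lt_succ h)]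
        rw [show ([] : List Char).reverse = [] from rfl, pvPre_nil _ (pvLines_ne_nil rest)]
        simp [pvLines, pvPre]
      · have hpre : List.isPrefixOf ['\n'] (c :: rest) = false := by
          simp [List.isPrefixOf]; exact fun h => hc h.symm
        rw [PySem.Chars.splitOn.go]
        simp only [hpre, Bool.false_eq_true, if_false]
        rw [ih rest (c :: cur) acc (by simpa using Nat.lt_of_succ_lt_succ h)]
        rw [show pvLines (c :: rest) = pvPre [c] (pvLines rest) by simp [pvLines, hc]]
        rw [pvPre_pvPre]
        simp

theorem pvSplitOn_eq (cs : List Char) : PySem.Chars.splitOn cs ['\n'] = pvLines cs := by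
  unfold PySem.Chars.splitOn
  rw [pvSplitOn_go_eq (cs.length + 1) cs [] [] (by omega)]
  simp [pvPre_nil _ (pvLines_ne_nil cs)]

-- single-character count is List.count
theorem pvCount_go_eq (c : Char) (fuel : Nat) (l : List Char) (acc : Nat)
    (h : l.length ≤ fuel) :
    PySem.Chars.count.go [c] fuel l acc = acc + l.count c := by
  induction fuel generalizing l acc with
  | zero =>
    cases l with
    | nil => simp [PySem.Chars.count.go]
    | cons a t => simp at h
  | succ fuel ih =>
    cases l with
    | nil => simp [PySem.Chars.count.go]
    | cons a t =>
      by_cases hc : a = c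
      · subst hc
        have hpre : List.isPrefixOf [a] (a :: t) = true := by simp [List.isPrefixOf]
        rw [PySem.Chars.count.go]
        simp only [hpre, if_true]
        rw [show List.drop [a].length (a :: t) = t by simp]
        rw [ih t (acc + 1) (by simpa using Nat.le_of_succ_le_succ h)]
        simp
        omega
      · have hpre : List.isPrefixOf [c] (a :: t) = false := by simp [List.isPrefixOf]; exact fun h => hc h.symm
        rw [PySem.Chars.count.go]
        simp only [hpre, Bool.false_eq_true, if_false]
        rw [ih t acc (by simpa using Nat.le_of_succ_le_succ h)]
        simp [hc]

theorem pvCount_eq (c : Char) (l : List Char) : PySem.Chars.count l [c] = l.count c := by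
  unfold PySem.Chars.count
  simp only [List.isEmpty_cons, if_false, Bool.false_eq_true]
  simpa using pvCount_go_eq c l.length l 0 (le_refl _)

-- the first line of pvLines cs is a prefix of cs
theorem pvLines_headI_prefix (cs : List Char) : (pvLines cs).headI <+: cs := by
  induction cs with
  | nil => simp [pvLines]
  | cons c rest ih =>
    by_cases h : c = '\n'
    · simp [pvLines, h]
    · simp only [pvLines, h, if_false]
      cases hl : pvLines rest with
      | nil => exact absurd hl (pvLines_ne_nil rest)
      | cons h0 t =>
        rw [hl] at ih
        simp only [List.headI] at ih
        simp only [pvPre, List.headI, List.cons_append, List.nil_append]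
        exact List.cons_prefix_cons.mpr ⟨rfl, ih⟩

-- a prefix of cs with no newline is a prefix of the first line
theorem pvPrefix_headI (pat cs : List Char) (hp : pat <+: cs) (hn : '\n' ∉ pat) :
    pat <+: (pvLines cs).headI := by
  induction cs generalizing pat with
  | nil => simpa [pvLines] using hp
  | cons c rest ih =>
    cases pat with
    | nil => simp
    | cons p pt =>
      obtain ⟨hpc, hpt⟩ := List.cons_prefix_cons.mp hp
      subst hpc
      have hc : p ≠ '\n' := by intro h; exact hn (by simp [h])
      simp only [pvLines, hc, if_false]
      cases hl : pvLines rest with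
      | nil => exact absurd hl (pvLines_ne_nil rest)
      | cons h0 t =>
        have hih := ih pt hpt (fun h => hn (by simp [h]))
        rw [hl] at hih
        simp only [List.headI] at hih
        simp only [pvPre, List.headI, List.cons_append, List.nil_append]
        exact List.cons_prefix_cons.mpr ⟨rfl, hih⟩

-- no line of pvLines contains a newline
theorem pvLines_no_nl (cs : List Char) : ∀ l ∈ pvLines cs, '\n' ∉ l := by
  induction cs with
  | nil => simp [pvLines]
  | cons c rest ih =>
    by_cases h : c = '\n'
    · simp only [pvLines, h, if_true]
      intro l hl
      rcases List.mem_cons.mp hl with rfl | hl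
      · simp
      · exact ih l hl
    · simp only [pvLines, h, if_false]
      cases hl : pvLines rest with
      | nil => exact absurd hl (pvLines_ne_nil rest)
      | cons h0 t =>
        intro l hml
        simp only [pvPre, List.mem_cons] at hml
        rcases hml with rfl | hml
        · intro hmem
          rcases List.mem_cons.mp (by simpa using hmem) with h' | h'
          · exact h h'.symm
          · exact ih h0 (by simp [hl]) h'
        · exact ih l (by simp [hl, hml])

-- MAIN: the index of the first line containing pat is the newline count before pat's
-- first occurrence
theorem pvMain (pat : List Char) (hpat : pat ≠ []) (hnl : '\n' ∉ pat) :
    ∀ (cs : List Char) (pos : Nat), pat <+: cs.drop pos → (∀ j < pos, ¬ pat <+: cs.drop j) →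
    (pvLines cs).findIdx? (fun l => PySem.Chars.isIn pat l) = some ((cs.take pos).count '\n') := by
  intro cs
  induction cs with
  | nil =>
    intro pos hp _
    simp only [List.drop_nil] at hp
    exact absurd (List.prefix_nil.mp hp) hpat
  | cons c rest ih =>
    intro pos hp hmin
    cases pos with
    | zero =>
      simp only [List.drop_zero] at hp
      have hhead : pat <+: (pvLines (c :: rest)).headI := pvPrefix_headI pat (c :: rest) hp hnl
      cases hl : pvLines (c :: rest) with
      | nil => exact absurd hl (pvLines_ne_nil _)
      | cons h0 t =>
        rw [hl] at hhead
        simp only [List.headI] at hhead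
        have : PySem.Chars.isIn pat h0 = true :=
          (PySem.Chars.isIn_iff_infix pat h0).mpr hhead.isInfix
        simp [List.findIdx?_cons, this]
    | succ p =>
      have h0 : ¬ pat <+: (c :: rest) := by simpa using hmin 0 (Nat.succ_pos p)
      have hdrop : pat <+: rest.drop p := by simpa using hp
      have hmin' : ∀ j < p, ¬ pat <+: rest.drop j := by
        intro j hj
        simpa using hmin (j + 1) (by omega)
      have IH := ih p hdrop hmin'
      by_cases hc : c = '\n'
      · have hnilfalse : PySem.Chars.isIn pat [] = false := by
          rw [← Bool.not_eq_true, PySem.Chars.isIn_iff_infix]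
          intro habs
          exact hpat (List.eq_nil_of_infix_nil habs)
        simp only [pvLines, hc, if_true]
        rw [List.findIdx?_cons]
        simp only [hnilfalse, Bool.false_eq_true, if_false, IH]
        simp
      · simp only [pvLines, hc, if_false]
        cases hl : pvLines rest with
        | nil => exact absurd hl (pvLines_ne_nil rest)
        | cons hd t =>
          have hsame : PySem.Chars.isIn pat (c :: hd) = PySem.Chars.isIn pat hd := by
            by_cases hh : PySem.Chars.isIn pat hd = true
            · rw [hh, PySem.Chars.isIn_iff_infix]
              exact List.infix_cons ((PySem.Chars.isIn_iff_infix pat hd).mp hh)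
            · rw [Bool.not_eq_true] at hh
              rw [hh, ← Bool.not_eq_true, PySem.Chars.isIn_iff_infix]
              intro habs
              rcases List.infix_cons_iff.mp habs with hpre | hinf
              · -- pat <+: c :: hd, and c :: hd <+: c :: rest: contradicts minimality at 0
                have hhd : hd <+: rest := by
                  have := pvLines_headI_prefix rest
                  rw [hl] at this
                  simpa using this
                exact h0 (hpre.trans (List.cons_prefix_cons.mpr ⟨rfl, hhd⟩))
              · exact absurd ((PySem.Chars.isIn_iff_infix pat hd).mpr hinf) (by simp [hh])
          rw [hl] at IH
          simp only [pvPre, List.singleton_append]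
          rw [List.findIdx?_cons, hsame]
          rw [List.findIdx?_cons] at IH
          simp only [List.take_succ_cons, List.count_cons]
          by_cases hh : PySem.Chars.isIn pat hd = true
          · simp only [hh, if_true] at IH ⊢
            simpa [hc] using IH
          · rw [Bool.not_eq_true] at hh
            simp only [hh, Bool.false_eq_true, if_false] at IH ⊢
            simpa [hc] using IH

-- A's loop is findIdx? plus the fragment at the found index
theorem pvALoop_eq (pat : String) (full : List String) (ctx : Int) (ls : List String) (k : Nat) :
    pvALoop pat full ctx k ls =
      (ls.findIdx? (fun l => PySem.Str.isIn pat l)).map (fun j =>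
        PySem.Str.join "\n" (PySem.List.slice full
          (some (max 0 (((k + j : Nat) : Int) - ctx)))
          (some (min ((full.length : Int)) (((k + j : Nat) : Int) + ctx + 1))))) := by
  induction ls generalizing k with
  | nil => simp [pvALoop]
  | cons line rest ih =>
    rw [pvALoop, List.findIdx?_cons]
    by_cases h : PySem.Str.isIn pat line = true
    · rw [if_pos h, if_pos h]
      simp
    · rw [if_neg h, if_neg h, ih (k + 1), Option.map_map]
      cases List.findIdx? (fun l => PySem.Str.isIn pat l) rest with
      | none => simp
      | some j =>
        simp only [Option.map_some, Function.comp]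
        rw [show k + 1 + j = k + (j + 1) from by omega]

-- code.split('\n') in both ports, on the char level
theorem pvSplit_eq (code : String) :
    ((PySem.Str.split? code "\n").getD []).map String.toList = pvLines code.toList := by
  have h := PySem.Str.split?_map code "\n"
  rw [show ("\n" : String).toList = ['\n'] by rfl] at h
  unfold PySem.Chars.split? at h
  simp only [List.isEmpty_cons, Bool.false_eq_true, if_false] at h
  rw [pvSplitOn_eq] at h
  cases hs : PySem.Str.split? code "\n" with
  | none => rw [hs] at h; simp at h
  | some L => rw [hs] at h; simpa using h

-- ===== VERDICT (by name: the statement is the Claim_ definition above) =====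
theorem extract_usage_fragment_spec : Claim_equal_extract_usage_fragment := by
  intro code tm ctx _
  unfold Spec_extract_usage_fragment
  unfold extract_usage_fragment extract_usage_fragment_alt
  by_cases htm : tm = ""
  · simp [htm]
  · by_cases hin : PySem.Str.isIn (tm ++ "(") code = true
    · have hinC : PySem.Chars.isIn (tm.toList ++ ['(']) code.toList = true := by
        simpa [PySem.Str.isIn_eq] using hin
      by_cases hnlB : PySem.Str.isIn "\n" tm = true
      · -- pattern contains a newline: A's loop finds no line, B's extra guard fires
        have hnl : '\n' ∈ tm.toList := by
          have h1 := hnlB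
          rw [PySem.Str.isIn_eq, show ("\n" : String).toList = ['\n'] from rfl] at h1
          exact (List.singleton_infix_iff _ _).mp ((PySem.Chars.isIn_iff_infix _ _).mp h1)
        have hnlC : PySem.Chars.isIn ['\n'] tm.toList = true := by
          simpa [PySem.Str.isIn_eq] using hnlB
        have hall : ∀ x ∈ (PySem.Str.split? code "\n").getD [],
            PySem.Chars.isIn (tm.toList ++ ['(']) x.toList = false := by
          intro x hx
          have hmem : x.toList ∈ pvLines code.toList := by
            rw [← pvSplit_eq code]
            exact List.mem_map_of_mem hx
          rw [← Bool.not_eq_true, PySem.Chars.isIn_iff_infix]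
          intro habs
          exact pvLines_no_nl code.toList x.toList hmem (habs.subset (List.mem_append_left _ hnl))
        simpa [htm, hinC, hnlC, pvALoop_eq] using hall
      · -- the real case: find + newline count locates the first matching line
        have hnl : '\n' ∉ tm.toList := by
          intro hmem
          apply hnlB
          rw [PySem.Str.isIn_eq, show ("\n" : String).toList = ['\n'] from rfl]
          exact (PySem.Chars.isIn_iff_infix _ _).mpr ((List.singleton_infix_iff _ _).mpr hmem)
        have hnlC : PySem.Chars.isIn ['\n'] tm.toList = false := by
          simpa [PySem.Str.isIn_eq] using (Bool.not_eq_true _).mp hnlB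
        have hpatne : tm.toList ++ ['('] ≠ ([] : List Char) := by simp
        have hnlp : '\n' ∉ tm.toList ++ ['('] := by
          intro h1
          rcases List.mem_append.mp h1 with h1 | h1
          · exact hnl h1
          · simp at h1
        have hposnn : 0 ≤ PySem.Chars.find code.toList (tm.toList ++ ['(']) :=
          (PySem.Chars.find_nonneg_iff _ _).mpr ((PySem.Chars.isIn_iff_infix _ _).mp hinC)
        obtain ⟨hpre, hminim⟩ := PySem.Chars.find_spec hposnn
        have hM := pvMain (tm.toList ++ ['(']) hpatne hnlp code.toList
          (PySem.Chars.find code.toList (tm.toList ++ ['('])).toNat hpre hminim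
        have hfind : List.findIdx? (fun l => PySem.Str.isIn (tm ++ "(") l)
            ((PySem.Str.split? code "\n").getD [])
            = some ((code.toList.take
                (PySem.Chars.find code.toList (tm.toList ++ ['('])).toNat).count '\n') := by
          rw [← pvSplit_eq code, List.findIdx?_map] at hM
          rw [← hM]
          congr 1
          funext l
          simp [PySem.Str.isIn_eq, Function.comp]
        have hslice : PySem.List.slice code.toList none
            (some (PySem.Chars.find code.toList (tm.toList ++ ['(']))) =
            code.toList.take (PySem.Chars.find code.toList (tm.toList ++ ['('])).toNat :=
          PySem.List.slice_to _ hposnn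
        simp at hfind
        simp [htm, hinC, hnlC, pvALoop_eq, hslice, pvCount_eq]
        exact ⟨_, hfind, rfl⟩
    · have hinC : PySem.Chars.isIn (tm.toList ++ ['(']) code.toList = false := by
        simpa [PySem.Str.isIn_eq] using Bool.not_eq_true _ |>.mp hin
      simp [htm, hinC]
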